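-- pv_equiv track=rewrite | github.com/purple-phoenix/dailyprogrammer | python_files/project_375_card_flipping/card_flipper.py | flip_card_helper
-- ===== SOURCE A (Python) =====
-- from typing import Dict, List, Union, Optional, Tuple, Callable
--
-- Card = bool
--
-- Game = List[Optional[Card]]
--
-- def is_face_up(card: Card) -> bool:
--     return card
--
-- def can_flip(card: Card) -> bool:
--     return is_face_up(card)
--
-- def flip_card_helper(game: Game, index: int, new_index: int):
--     if not game:
--         return []
--     else:
--         card = game[0]
--         if index == new_index and can_flip(card):
--             return [None] + flip_card_helper(game[1:], index, new_index + 1)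
--         else:
--             return [card] + flip_card_helper(game[1:], index, new_index + 1)
-- ===== SOURCE B (Python) =====
-- def flip_card_helper(game, index, new_index):
--     result = list(game)
--     off = index - new_index
--     if 0 <= off < len(result) and result[off]:
--         result[off] = None
--     return result
-- ===== Notes on version B (the rewrite author's own statement) =====
-- stated objective: simpler
-- what changed: B replaces A's per-element recursion that compares index with a running counter (rebuilding the list with slicing and concatenation) by computing the single affected offset index - new_index in closed form, copying the list once and replacing at most that one position.
import Mathlib
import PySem

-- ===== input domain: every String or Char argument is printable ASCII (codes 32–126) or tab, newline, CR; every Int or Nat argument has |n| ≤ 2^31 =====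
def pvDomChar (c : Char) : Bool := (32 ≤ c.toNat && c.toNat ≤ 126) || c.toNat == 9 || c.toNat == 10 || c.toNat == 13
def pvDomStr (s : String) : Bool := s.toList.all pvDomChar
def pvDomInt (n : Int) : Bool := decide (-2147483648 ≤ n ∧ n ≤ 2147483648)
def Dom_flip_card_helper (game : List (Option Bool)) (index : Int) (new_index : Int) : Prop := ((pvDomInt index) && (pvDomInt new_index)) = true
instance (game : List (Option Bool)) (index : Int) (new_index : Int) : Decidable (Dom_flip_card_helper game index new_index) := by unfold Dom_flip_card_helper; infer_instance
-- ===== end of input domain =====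

-- B replaces A's per-element recursion (comparing index with a running counter) by a
-- closed-form single-position update at offset index - new_index; objective: simpler.


-- ===== PORT A =====
-- can_flip(card) → is_face_up(card) → card; the Python truthiness test 'can_flip(card)'
-- succeeds exactly when card is True (None and False are falsy).
def pv_can_flip (card : Option Bool) : Bool := card == some true

def flip_card_helper (game : List (Option Bool)) (index : Int) (new_index : Int) : List (Option Bool) :=
  match game with
  | [] => []
  | card :: rest =>
    if index = new_index ∧ pv_can_flip card then
      none :: flip_card_helper rest index (new_index + 1)
    else
      card :: flip_card_helper rest index (new_index + 1)

-- ===== PORT B =====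
-- closed form: the only position where index == new_index + k is k = index - new_index
def flip_card_helper_alt (game : List (Option Bool)) (index : Int) (new_index : Int) : List (Option Bool) :=
  let off := index - new_index
  if 0 ≤ off ∧ off < game.length ∧ PySem.List.pyGet? game off = some (some true) then
    game.set off.toNat none
  else
    game

-- ===== PRECONDITION & SPEC =====
def Spec_flip_card_helper (game : List (Option Bool)) (index : Int) (new_index : Int) (out : List (Option Bool)) : Prop := out = flip_card_helper_alt game index new_index
instance (game : List (Option Bool)) (index : Int) (new_index : Int) (out : List (Option Bool)) : Decidable (Spec_flip_card_helper game index new_index out) := by unfold Spec_flip_card_helper; infer_instance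

-- ===== CLAIM (what is proved, stated in full; the proofs are below) =====
def Claim_equal_flip_card_helper : Prop := ∀ (game : List (Option Bool)) (index : Int) (new_index : Int), Dom_flip_card_helper game index new_index → Spec_flip_card_helper game index new_index (flip_card_helper game index new_index)

-- ===== LEMMAS AND PROOFS =====

theorem flip_eq_alt (game : List (Option Bool)) (index : Int) (new_index : Int) :
    flip_card_helper game index new_index = flip_card_helper_alt game index new_index := by
  induction game generalizing new_index with
  | nil => simp [flip_card_helper, flip_card_helper_alt]
  | cons card rest ih =>
    simp only [flip_card_helper, flip_card_helper_alt, pv_can_flip]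
    by_cases h : index = new_index ∧ card == some true
    · obtain ⟨h1, h2⟩ := h
      have hc : card = some true := by simpa using h2
      subst h1 hc
      simp [flip_card_helper_alt, PySem.List.pyGet?, PySem.List.pyIdx?, ih]
    · rw [if_neg h, ih]
      simp only [flip_card_helper_alt]
      by_cases hle : 0 ≤ index - (new_index + 1)
      · -- the head is not the target; offsets in head and tail line up
        have htn : (index - new_index).toNat = (index - (new_index + 1)).toNat + 1 := by omega
        have hget : PySem.List.pyGet? (card :: rest) (index - new_index) =
            PySem.List.pyGet? rest (index - (new_index + 1)) := by
          rw [PySem.List.pyGet?_of_nonneg (h := by omega),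
              PySem.List.pyGet?_of_nonneg (h := hle), htn]
          simp
        have hcEq : (0 ≤ index - new_index ∧ index - new_index < ((card :: rest).length : Int) ∧
              PySem.List.pyGet? (card :: rest) (index - new_index) = some (some true)) ↔
            (0 ≤ index - (new_index + 1) ∧ index - (new_index + 1) < (rest.length : Int) ∧
              PySem.List.pyGet? rest (index - (new_index + 1)) = some (some true)) := by
          rw [hget]
          simp only [List.length_cons]
          constructor
          · rintro ⟨_, hb, hg⟩; exact ⟨hle, by push_cast at hb ⊢; omega, hg⟩
          · rintro ⟨_, hb, hg⟩; exact ⟨by omega, by push_cast at hb ⊢; omega, hg⟩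
        by_cases hc : 0 ≤ index - (new_index + 1) ∧ index - (new_index + 1) < (rest.length : Int) ∧
            PySem.List.pyGet? rest (index - (new_index + 1)) = some (some true)
        · rw [if_pos hc, if_pos (hcEq.mpr hc), htn]
          simp
        · rw [if_neg hc, if_neg (fun hx => hc (hcEq.mp hx))]
      · -- tail offset negative: neither side changes anything
        rw [if_neg (by omega : ¬ (0 ≤ index - (new_index + 1) ∧
            index - (new_index + 1) < (rest.length : Int) ∧
            PySem.List.pyGet? rest (index - (new_index + 1)) = some (some true)))]
        by_cases hc2 : 0 ≤ index - new_index ∧ index - new_index < ((card :: rest).length : Int) ∧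
            PySem.List.pyGet? (card :: rest) (index - new_index) = some (some true)
        · exfalso
          obtain ⟨hc0, hc1, hcg⟩ := hc2
          have h0 : index - new_index = 0 := by omega
          rw [h0, PySem.List.pyGet?_zero_cons] at hcg
          have : card = some true := by simpa using hcg
          exact h ⟨by omega, by simp [this]⟩
        · rw [if_neg hc2]

-- ===== VERDICT (by name: the statement is the Claim_ definition above) =====
theorem flip_card_helper_spec : Claim_equal_flip_card_helper := by
  intro game index new_index _
  exact flip_eq_alt game index new_index
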